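-- pv_equiv track=rewrite | github.com/SSCT-Lab/TransTest | core/analysis/compare_rule_vs_llm_report.py | _family
-- ===== SOURCE A (Python) =====
-- def _family(api_id: str) -> str:
--     s = (api_id or "").upper()
--     if "CONV" in s: return "CONV"
--     if any(k in s for k in ["DENSE","LINEAR","FC"]): return "DENSE"
--     if "POOL" in s: return "POOL"
--     if any(k in s for k in ["BATCHNORM","NORM","NORMALIZATION"]): return "NORM"
--     if any(k in s for k in ["OPT_","OPTIM"]): return "OPT"
--     if any(k in s for k in ["LOSS","CROSSENTROPY","MSE"]): return "LOSS"
--     if any(k in s for k in ["RELU","SIGMOID","TANH","ACT"]): return "ACT"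
--     return "OTHER"
-- ===== SOURCE B (Python) =====
-- # Multi-pattern text scan: walk the string once left to right; at each position
-- # test which keywords start there and keep the best (lowest-priority) family seen.
-- _KEYS = [
--     ("CONV", 0, "CONV"),
--     ("DENSE", 1, "DENSE"), ("LINEAR", 1, "DENSE"), ("FC", 1, "DENSE"),
--     ("POOL", 2, "POOL"),
--     ("BATCHNORM", 3, "NORM"), ("NORM", 3, "NORM"), ("NORMALIZATION", 3, "NORM"),
--     ("OPT_", 4, "OPT"), ("OPTIM", 4, "OPT"),
--     ("LOSS", 5, "LOSS"), ("CROSSENTROPY", 5, "LOSS"), ("MSE", 5, "LOSS"),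
--     ("RELU", 6, "ACT"), ("SIGMOID", 6, "ACT"), ("TANH", 6, "ACT"), ("ACT", 6, "ACT"),
-- ]
--
-- def _family(api_id: str) -> str:
--     s = (api_id or "").upper()
--     best_pr, best_fam = 8, "OTHER"
--     for i in range(len(s)):
--         for kw, pr, fam in _KEYS:
--             if pr < best_pr and s.startswith(kw, i):
--                 best_pr, best_fam = pr, fam
--     return best_fam
-- ===== Notes on version B (the rewrite author's own statement) =====
-- stated objective: alternative
-- what changed: Replaced A's keyword-driven chain of substring tests with a single left-to-right scan of the string that, at each position, checks which keywords start there and keeps the lowest-priority (best) family in an accumulator.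
import Mathlib
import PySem

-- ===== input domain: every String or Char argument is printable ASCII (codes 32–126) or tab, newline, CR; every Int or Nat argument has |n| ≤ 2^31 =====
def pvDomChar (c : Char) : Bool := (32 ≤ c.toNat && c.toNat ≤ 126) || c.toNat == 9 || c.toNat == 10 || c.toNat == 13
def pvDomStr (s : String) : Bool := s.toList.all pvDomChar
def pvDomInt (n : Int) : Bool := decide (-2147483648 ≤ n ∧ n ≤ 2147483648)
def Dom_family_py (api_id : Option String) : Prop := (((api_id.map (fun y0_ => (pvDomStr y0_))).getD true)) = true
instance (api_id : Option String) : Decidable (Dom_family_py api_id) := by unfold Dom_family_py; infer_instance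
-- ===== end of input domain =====

-- B replaces A's keyword-driven if chain with a single left-to-right scan of the string that
-- tests, at each position, which keywords start there and keeps the lowest-priority family (alternative; same cost).


-- ===== PORT A =====
def family_py (api_id : Option String) : String :=
  let s := PySem.Str.upper (api_id.getD "")
  if PySem.Str.isIn "CONV" s then "CONV"
  else if (["DENSE","LINEAR","FC"].any (fun k => PySem.Str.isIn k s)) then "DENSE"
  else if PySem.Str.isIn "POOL" s then "POOL"
  else if (["BATCHNORM","NORM","NORMALIZATION"].any (fun k => PySem.Str.isIn k s)) then "NORM"
  else if (["OPT_","OPTIM"].any (fun k => PySem.Str.isIn k s)) then "OPT"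
  else if (["LOSS","CROSSENTROPY","MSE"].any (fun k => PySem.Str.isIn k s)) then "LOSS"
  else if (["RELU","SIGMOID","TANH","ACT"].any (fun k => PySem.Str.isIn k s)) then "ACT"
  else "OTHER"

-- ===== PORT B =====
-- _KEYS of Source B: (keyword as its character list, priority, family)
def famKeys : List (List Char × Int × String) :=
  [("CONV".toList, 0, "CONV"),
   ("DENSE".toList, 1, "DENSE"), ("LINEAR".toList, 1, "DENSE"), ("FC".toList, 1, "DENSE"),
   ("POOL".toList, 2, "POOL"),
   ("BATCHNORM".toList, 3, "NORM"), ("NORM".toList, 3, "NORM"), ("NORMALIZATION".toList, 3, "NORM"),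
   ("OPT_".toList, 4, "OPT"), ("OPTIM".toList, 4, "OPT"),
   ("LOSS".toList, 5, "LOSS"), ("CROSSENTROPY".toList, 5, "LOSS"), ("MSE".toList, 5, "LOSS"),
   ("RELU".toList, 6, "ACT"), ("SIGMOID".toList, 6, "ACT"), ("TANH".toList, 6, "ACT"), ("ACT".toList, 6, "ACT")]

-- the inner `for kw, pr, fam in _KEYS` loop at one position (s.startswith(kw, i) = prefix of the suffix)
def famStep (t : List Char) (b : Int × String) : Int × String :=
  famKeys.foldl (fun b k => if k.2.1 < b.1 ∧ k.1.isPrefixOf t then (k.2.1, k.2.2) else b) b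

-- the outer `for i in range(len(s))` loop: visit every nonempty suffix of s, left to right
def famScan : List Char → Int × String → Int × String
  | [], b => b
  | c :: rest, b => famScan rest (famStep (c :: rest) b)

def family_py_alt (api_id : Option String) : String :=
  let s := PySem.Str.upper (api_id.getD "")
  (famScan s.toList (8, "OTHER")).2

-- ===== PRECONDITION & SPEC =====
def Spec_family_py (api_id : Option String) (out : String) : Prop := out = family_py_alt api_id
instance (api_id : Option String) (out : String) : Decidable (Spec_family_py api_id out) := by unfold Spec_family_py; infer_instance

-- ===== CLAIM (what is proved, stated in full; the proofs are below) =====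
def Claim_equal_family_py : Prop := ∀ (api_id : Option String), Dom_family_py api_id → Spec_family_py api_id (family_py api_id)

-- ===== LEMMAS AND PROOFS =====

-- family name attached to each priority (8 = no match)
def famF (p : Int) : String :=
  if p = 0 then "CONV" else if p = 1 then "DENSE" else if p = 2 then "POOL"
  else if p = 3 then "NORM" else if p = 4 then "OPT" else if p = 5 then "LOSS"
  else if p = 6 then "ACT" else "OTHER"

-- guarded-min fold abstraction of both loops
def mfold (L : List (List Char × Int × String)) (f : List Char × Int × String → Int) (p : Int) : Int :=
  L.foldl (fun x k => min x (f k)) p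

theorem mfold_min (L : List (List Char × Int × String)) (f : List Char × Int × String → Int) :
    ∀ p q : Int, mfold L f (min p q) = min (mfold L f p) q := by
  induction L with
  | nil => intro p q; rfl
  | cons k L ih =>
      intro p q
      show mfold L f (min (min p q) (f k)) = min (mfold L f (min p (f k))) q
      rw [show min (min p q) (f k) = min (min p (f k)) q by omega, ih]

theorem mfold_le (L : List (List Char × Int × String)) (f : List Char × Int × String → Int)
    (p : Int) : mfold L f p ≤ p := by
  induction L generalizing p with
  | nil => exact le_refl p
  | cons k L ih =>
      show mfold L f (min p (f k)) ≤ p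
      exact le_trans (ih (min p (f k))) (by omega)

theorem mfold_merge (L : List (List Char × Int × String))
    (f g : List Char × Int × String → Int) (p : Int) :
    mfold L g (mfold L f p) = mfold L (fun k => min (f k) (g k)) p := by
  induction L generalizing p with
  | nil => rfl
  | cons k L ih =>
      show mfold L g (min (mfold L f (min p (f k))) (g k))
          = mfold L (fun k => min (f k) (g k)) (min p (min (f k) (g k)))
      rw [← mfold_min, ih (min (min p (f k)) (g k))]
      rw [show min (min p (f k)) (g k) = min p (min (f k) (g k)) by omega]

theorem mfold_congr (L : List (List Char × Int × String))
    (f g : List Char × Int × String → Int) (h : ∀ k ∈ L, f k = g k) (p : Int) :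
    mfold L f p = mfold L g p := by
  induction L generalizing p with
  | nil => rfl
  | cons k L ih =>
      show mfold L f (min p (f k)) = mfold L g (min p (g k))
      rw [h k (List.mem_cons_self ..), ih (fun k hk => h k (List.mem_cons_of_mem _ hk))]

theorem mfold_of_le (L : List (List Char × Int × String))
    (f : List Char × Int × String → Int) (p : Int) (h : ∀ k ∈ L, p ≤ f k) :
    mfold L f p = p := by
  induction L with
  | nil => rfl
  | cons k L ih =>
      show mfold L f (min p (f k)) = p
      rw [show min p (f k) = p by have := h k (List.mem_cons_self ..); omega]
      exact ih (fun k hk => h k (List.mem_cons_of_mem _ hk))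

-- the inner pair loop is the guarded-min fold, with the family determined by the priority
theorem foldl_pair_eq (t : List Char) (L : List (List Char × Int × String))
    (hL : ∀ k ∈ L, k.2.2 = famF k.2.1 ∧ 0 ≤ k.2.1 ∧ k.2.1 ≤ 999) :
    ∀ p : Int, p ≤ 1000 →
    L.foldl (fun b k => if k.2.1 < b.1 ∧ k.1.isPrefixOf t then (k.2.1, k.2.2) else b) (p, famF p)
      = (mfold L (fun k => if k.1.isPrefixOf t then k.2.1 else 1000) p,
         famF (mfold L (fun k => if k.1.isPrefixOf t then k.2.1 else 1000) p)) := by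
  induction L with
  | nil => intro p _; rfl
  | cons k L ih =>
      intro p hp
      obtain ⟨hfam, hlo, hhi⟩ := hL k (List.mem_cons_self ..)
      have hL' := fun k hk => hL k (List.mem_cons_of_mem _ hk)
      have hstep : (if k.2.1 < (p, famF p).1 ∧ k.1.isPrefixOf t then (k.2.1, k.2.2) else (p, famF p))
          = (min p (if k.1.isPrefixOf t then k.2.1 else 1000),
             famF (min p (if k.1.isPrefixOf t then k.2.1 else 1000))) := by
        by_cases hpre : k.1.isPrefixOf t = true
        · by_cases hlt : k.2.1 < p
          · rw [if_pos ⟨hlt, hpre⟩, if_pos hpre, show min p k.2.1 = k.2.1 by omega, hfam]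
          · rw [if_neg (fun h => hlt h.1), if_pos hpre, show min p k.2.1 = p by omega]
        · rw [if_neg (fun h => hpre h.2), if_neg hpre, show min p 1000 = p by omega]
      show List.foldl _ ((fun b k => if k.2.1 < b.1 ∧ k.1.isPrefixOf t then (k.2.1, k.2.2) else b) (p, famF p) k) L = _
      simp only [hstep]
      exact ih hL' (min p (if k.1.isPrefixOf t then k.2.1 else 1000)) (by
        by_cases hpre : k.1.isPrefixOf t = true <;> simp [hpre] <;> omega)

theorem famKeys_facts : ∀ k ∈ famKeys, k.2.2 = famF k.2.1 ∧ 0 ≤ k.2.1 ∧ k.2.1 ≤ 999 := by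
  decide

-- the whole scan computes the min priority over keywords occurring as infixes
theorem famScan_eq (t : List Char) : ∀ p : Int, p ≤ 1000 →
    famScan t (p, famF p)
      = (mfold famKeys (fun k => if k.1 <:+: t then k.2.1 else 1000) p,
         famF (mfold famKeys (fun k => if k.1 <:+: t then k.2.1 else 1000) p)) := by
  induction t with
  | nil =>
      intro p hp
      show (p, famF p) = _
      have hne : ∀ k ∈ famKeys, ¬ k.1 = [] := by decide
      rw [mfold_congr famKeys _ (fun _ => 1000)
        (fun k hk => if_neg (fun h => hne k hk (List.infix_nil.mp h)))]
      rw [mfold_of_le famKeys _ p (fun k _ => by omega)]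
  | cons c rest ih =>
      intro p hp
      show famScan rest (famStep (c :: rest) (p, famF p)) = _
      rw [show famStep (c :: rest) (p, famF p)
            = (mfold famKeys (fun k => if k.1.isPrefixOf (c :: rest) then k.2.1 else 1000) p,
               famF (mfold famKeys (fun k => if k.1.isPrefixOf (c :: rest) then k.2.1 else 1000) p))
          from foldl_pair_eq (c :: rest) famKeys famKeys_facts p hp]
      rw [ih _ (le_trans (mfold_le ..) hp), mfold_merge]
      rw [mfold_congr famKeys _ (fun k => if k.1 <:+: (c :: rest) then k.2.1 else 1000)
        (by intro k hk
            obtain ⟨-, hlo, hhi⟩ := famKeys_facts k hk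
            dsimp only
            by_cases hpre : k.1.isPrefixOf (c :: rest) = true
            · have hP : k.1 <+: c :: rest := List.isPrefixOf_iff_prefix.mp hpre
              rw [if_pos hpre, if_pos (List.infix_cons_iff.mpr (Or.inl hP))]
              by_cases hinf : k.1 <:+: rest
              · rw [if_pos hinf]; omega
              · rw [if_neg hinf]; omega
            · rw [if_neg hpre]
              by_cases hinf : k.1 <:+: rest
              · rw [if_pos hinf, if_pos (List.infix_cons_iff.mpr (Or.inr hinf))]; omega
              · rw [if_neg hinf, if_neg (by
                  rw [List.infix_cons_iff]
                  rintro (hP | hI)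
                  · exact hpre (List.isPrefixOf_iff_prefix.mpr hP)
                  · exact hinf hI)]; omega)]

-- on a priority-sorted key list the guarded-min fold returns the first match
theorem mfold_first (L : List (List Char × Int × String)) (q : List Char × Int × String → Prop)
    [DecidablePred q] (hs : L.Pairwise (fun a b => a.2.1 ≤ b.2.1))
    (hb : ∀ k ∈ L, 0 ≤ k.2.1 ∧ k.2.1 ≤ 999) :
    ∀ p : Int, p ≤ 1000 →
    mfold L (fun k => if q k then k.2.1 else 1000) p
      = match L.find? (fun k => decide (q k)) with
        | some k => min p k.2.1
        | none => p := by
  induction L with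
  | nil => intro p _; rfl
  | cons k L ih =>
      intro p hp
      rw [List.pairwise_cons] at hs
      by_cases hq : q k
      · rw [List.find?_cons_of_pos (by simp [hq])]
        show mfold L _ (min p (if q k then k.2.1 else 1000)) = min p k.2.1
        rw [if_pos hq]
        exact mfold_of_le L _ _ (fun k' hk' => by
          have h1 := hs.1 k' hk'
          by_cases hq' : q k' <;> simp [hq'] <;> omega)
      · rw [List.find?_cons_of_neg (by simp [hq])]
        show mfold L _ (min p (if q k then k.2.1 else 1000)) = _
        rw [if_neg hq, show min p 1000 = p by omega]
        exact ih hs.2 (fun k hk => hb k (List.mem_cons_of_mem _ hk)) p hp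

theorem isIn_false {k s : String} (h : ¬ k.toList <:+: s.toList) : PySem.Str.isIn k s = false := by
  rw [← Bool.not_eq_true]
  intro hT
  exact h ((PySem.Str.isIn_iff_infix k s).mp hT)

-- ===== VERDICT (by name: the statement is the Claim_ definition above) =====
theorem family_py_spec : Claim_equal_family_py := by
  intro api_id _
  unfold Spec_family_py family_py family_py_alt
  dsimp only
  rw [show ((8 : Int), "OTHER") = ((8 : Int), famF 8) from rfl]
  rw [famScan_eq (PySem.Str.upper (api_id.getD "")).toList 8 (by omega)]
  dsimp only
  rw [mfold_first famKeys (fun k => k.1 <:+: (PySem.Str.upper (api_id.getD "")).toList)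
      (by decide) (fun k hk => (famKeys_facts k hk).2) 8 (by omega)]
  simp only [List.any_cons, List.any_nil, Bool.or_false]
  generalize PySem.Str.upper (api_id.getD "") = s
  by_cases h1 : ['C', 'O', 'N', 'V'] <:+: s.toList
  · rw [(PySem.Str.isIn_iff_infix "CONV" s).mpr h1]
    simp [famKeys, List.find?, famF, h1]
  rw [isIn_false (k := "CONV") (s := s) h1]
  by_cases h2 : ['D', 'E', 'N', 'S', 'E'] <:+: s.toList
  · rw [(PySem.Str.isIn_iff_infix "DENSE" s).mpr h2]
    simp [famKeys, List.find?, famF, h1, h2]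
  rw [isIn_false (k := "DENSE") (s := s) h2]
  by_cases h3 : ['L', 'I', 'N', 'E', 'A', 'R'] <:+: s.toList
  · rw [(PySem.Str.isIn_iff_infix "LINEAR" s).mpr h3]
    simp [famKeys, List.find?, famF, h1, h2, h3]
  rw [isIn_false (k := "LINEAR") (s := s) h3]
  by_cases h4 : ['F', 'C'] <:+: s.toList
  · rw [(PySem.Str.isIn_iff_infix "FC" s).mpr h4]
    simp [famKeys, List.find?, famF, h1, h2, h3, h4]
  rw [isIn_false (k := "FC") (s := s) h4]
  by_cases h5 : ['P', 'O', 'O', 'L'] <:+: s.toList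
  · rw [(PySem.Str.isIn_iff_infix "POOL" s).mpr h5]
    simp [famKeys, List.find?, famF, h1, h2, h3, h4, h5]
  rw [isIn_false (k := "POOL") (s := s) h5]
  by_cases h6 : ['B', 'A', 'T', 'C', 'H', 'N', 'O', 'R', 'M'] <:+: s.toList
  · rw [(PySem.Str.isIn_iff_infix "BATCHNORM" s).mpr h6]
    simp [famKeys, List.find?, famF, h1, h2, h3, h4, h5, h6]
  rw [isIn_false (k := "BATCHNORM") (s := s) h6]
  by_cases h7 : ['N', 'O', 'R', 'M'] <:+: s.toList
  · rw [(PySem.Str.isIn_iff_infix "NORM" s).mpr h7]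
    simp [famKeys, List.find?, famF, h1, h2, h3, h4, h5, h6, h7]
  rw [isIn_false (k := "NORM") (s := s) h7]
  by_cases h8 : ['N', 'O', 'R', 'M', 'A', 'L', 'I', 'Z', 'A', 'T', 'I', 'O', 'N'] <:+: s.toList
  · rw [(PySem.Str.isIn_iff_infix "NORMALIZATION" s).mpr h8]
    simp [famKeys, List.find?, famF, h1, h2, h3, h4, h5, h6, h7, h8]
  rw [isIn_false (k := "NORMALIZATION") (s := s) h8]
  by_cases h9 : ['O', 'P', 'T', '_'] <:+: s.toList
  · rw [(PySem.Str.isIn_iff_infix "OPT_" s).mpr h9]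
    simp [famKeys, List.find?, famF, h1, h2, h3, h4, h5, h6, h7, h8, h9]
  rw [isIn_false (k := "OPT_") (s := s) h9]
  by_cases h10 : ['O', 'P', 'T', 'I', 'M'] <:+: s.toList
  · rw [(PySem.Str.isIn_iff_infix "OPTIM" s).mpr h10]
    simp [famKeys, List.find?, famF, h1, h2, h3, h4, h5, h6, h7, h8, h9, h10]
  rw [isIn_false (k := "OPTIM") (s := s) h10]
  by_cases h11 : ['L', 'O', 'S', 'S'] <:+: s.toList
  · rw [(PySem.Str.isIn_iff_infix "LOSS" s).mpr h11]
    simp [famKeys, List.find?, famF, h1, h2, h3, h4, h5, h6, h7, h8, h9, h10, h11]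
  rw [isIn_false (k := "LOSS") (s := s) h11]
  by_cases h12 : ['C', 'R', 'O', 'S', 'S', 'E', 'N', 'T', 'R', 'O', 'P', 'Y'] <:+: s.toList
  · rw [(PySem.Str.isIn_iff_infix "CROSSENTROPY" s).mpr h12]
    simp [famKeys, List.find?, famF, h1, h2, h3, h4, h5, h6, h7, h8, h9, h10, h11, h12]
  rw [isIn_false (k := "CROSSENTROPY") (s := s) h12]
  by_cases h13 : ['M', 'S', 'E'] <:+: s.toList
  · rw [(PySem.Str.isIn_iff_infix "MSE" s).mpr h13]
    simp [famKeys, List.find?, famF, h1, h2, h3, h4, h5, h6, h7, h8, h9, h10, h11, h12, h13]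
  rw [isIn_false (k := "MSE") (s := s) h13]
  by_cases h14 : ['R', 'E', 'L', 'U'] <:+: s.toList
  · rw [(PySem.Str.isIn_iff_infix "RELU" s).mpr h14]
    simp [famKeys, List.find?, famF, h1, h2, h3, h4, h5, h6, h7, h8, h9, h10, h11, h12, h13, h14]
  rw [isIn_false (k := "RELU") (s := s) h14]
  by_cases h15 : ['S', 'I', 'G', 'M', 'O', 'I', 'D'] <:+: s.toList
  · rw [(PySem.Str.isIn_iff_infix "SIGMOID" s).mpr h15]
    simp [famKeys, List.find?, famF, h1, h2, h3, h4, h5, h6, h7, h8, h9, h10, h11, h12, h13, h14, h15]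
  rw [isIn_false (k := "SIGMOID") (s := s) h15]
  by_cases h16 : ['T', 'A', 'N', 'H'] <:+: s.toList
  · rw [(PySem.Str.isIn_iff_infix "TANH" s).mpr h16]
    simp [famKeys, List.find?, famF, h1, h2, h3, h4, h5, h6, h7, h8, h9, h10, h11, h12, h13, h14, h15, h16]
  rw [isIn_false (k := "TANH") (s := s) h16]
  by_cases h17 : ['A', 'C', 'T'] <:+: s.toList
  · rw [(PySem.Str.isIn_iff_infix "ACT" s).mpr h17]
    simp [famKeys, List.find?, famF, h1, h2, h3, h4, h5, h6, h7, h8, h9, h10, h11, h12, h13, h14, h15, h16, h17]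
  rw [isIn_false (k := "ACT") (s := s) h17]
  simp [famKeys, List.find?, famF, h1, h2, h3, h4, h5, h6, h7, h8, h9, h10, h11, h12, h13, h14, h15, h16, h17]
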